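-- pv_equiv track=rewrite | github.com/anglil/translate_0 | train_tune_test/train_tune_test_t2t/reg_modalities.py | get_translation_candidates_by_target
-- ===== SOURCE A (Python) =====
-- def get_translation_candidates_by_target(translation_candidates, train_tgt_token_set, lex_cap, in_effect=True):
--     '''
--     when using the lexicon for source token initialization, only consider translated source tokens that appear in the target text
--     '''
--     if len(translation_candidates) < lex_cap or not in_effect:
--         return translation_candidates
--     ret = []
--     for c in translation_candidates:
--         if c in train_tgt_token_set:
--             ret.append(c)
--             if len(ret) == lex_cap:
--                 return ret
--     ret_set = set(ret)
--     for c in translation_candidates: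
--         if c not in ret_set:
--             ret.append(c)
--             ret_set.add(c)
--     return ret
-- ===== SOURCE B (Python) =====
-- def get_translation_candidates_by_target(translation_candidates, train_tgt_token_set, lex_cap, in_effect=True):
--     # Single fused pass: collect target-set members (with early cap return) and
--     # deduplicated non-members in one traversal instead of A's two passes.
--     if len(translation_candidates) < lex_cap or not in_effect:
--         return translation_candidates
--     preferred = []
--     rest = []
--     seen_rest = set()
--     for c in translation_candidates:
--         if c in train_tgt_token_set:
--             preferred.append(c)
--             if len(preferred) == lex_cap:
--                 return preferred
--         elif c not in seen_rest:
--             rest.append(c)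
--             seen_rest.add(c)
--     return preferred + rest
-- ===== Notes on version B (the rewrite author's own statement) =====
-- stated objective: alternative
-- what changed: Replaces A's two separate passes (collect target-set members, then rebuild a set of the result and re-scan all candidates to append the non-members) with one fused traversal that simultaneously builds the preferred list (early return at the cap) and the deduplicated rest list.
import Mathlib
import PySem

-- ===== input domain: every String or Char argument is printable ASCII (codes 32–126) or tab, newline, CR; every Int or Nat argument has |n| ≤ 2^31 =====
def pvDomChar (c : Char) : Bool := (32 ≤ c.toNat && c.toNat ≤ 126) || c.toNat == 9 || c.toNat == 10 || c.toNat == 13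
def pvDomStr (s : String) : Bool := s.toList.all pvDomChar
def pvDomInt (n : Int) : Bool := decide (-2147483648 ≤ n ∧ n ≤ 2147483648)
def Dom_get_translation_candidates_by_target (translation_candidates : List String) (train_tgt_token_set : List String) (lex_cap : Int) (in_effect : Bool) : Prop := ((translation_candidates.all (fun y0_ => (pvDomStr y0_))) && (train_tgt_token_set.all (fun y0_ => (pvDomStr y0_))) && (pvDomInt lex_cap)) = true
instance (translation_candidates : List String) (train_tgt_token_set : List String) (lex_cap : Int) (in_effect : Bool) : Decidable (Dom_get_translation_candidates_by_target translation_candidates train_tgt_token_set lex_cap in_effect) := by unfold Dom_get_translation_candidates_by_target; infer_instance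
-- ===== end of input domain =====

-- B fuses A's two passes (collect target-set members, then re-scan to append deduplicated non-members) into one traversal; equal return value, no speed claim.


-- ===== PORT A =====
-- first loop of A: early return (.inl) when len(ret) == lex_cap, else final ret (.inr)
def pvA_loop1 (tgt : List String) (cap : Int) : List String → List String → (List String ⊕ List String)
  | [], ret => .inr ret
  | c :: cs, ret =>
    if tgt.contains c then
      let ret' := ret ++ [c]
      if (ret'.length : Int) = cap then .inl ret' else pvA_loop1 tgt cap cs ret'
    else pvA_loop1 tgt cap cs ret

-- second loop of A: append candidates not yet in ret_set
def pvA_loop2 : List String → List String → PySem.Set String → List String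
  | [], ret, _ => ret
  | c :: cs, ret, s =>
    if PySem.Set.contains s c then pvA_loop2 cs ret s
    else pvA_loop2 cs (ret ++ [c]) (PySem.Set.add s c)

def get_translation_candidates_by_target (translation_candidates : List String) (train_tgt_token_set : List String) (lex_cap : Int) (in_effect : Bool) : List String :=
  if (translation_candidates.length : Int) < lex_cap ∨ in_effect = false then translation_candidates
  else
    match pvA_loop1 train_tgt_token_set lex_cap translation_candidates [] with
    | .inl r => r
    | .inr ret => pvA_loop2 translation_candidates ret (PySem.Set.ofList ret)

-- ===== PORT B =====
-- single fused pass of B: preferred (early return at the cap), deduplicated rest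
def pvB_loop (tgt : List String) (cap : Int) : List String → List String → List String → PySem.Set String → List String
  | [], pref, rest, _ => pref ++ rest
  | c :: cs, pref, rest, seen =>
    if tgt.contains c then
      let pref' := pref ++ [c]
      if (pref'.length : Int) = cap then pref' else pvB_loop tgt cap cs pref' rest seen
    else if PySem.Set.contains seen c then pvB_loop tgt cap cs pref rest seen
    else pvB_loop tgt cap cs pref (rest ++ [c]) (PySem.Set.add seen c)

def get_translation_candidates_by_target_alt (translation_candidates : List String) (train_tgt_token_set : List String) (lex_cap : Int) (in_effect : Bool) : List String :=
  if (translation_candidates.length : Int) < lex_cap ∨ in_effect = false then translation_candidates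
  else pvB_loop train_tgt_token_set lex_cap translation_candidates [] [] PySem.Set.empty

-- ===== PRECONDITION & SPEC =====
def Spec_get_translation_candidates_by_target (translation_candidates : List String) (train_tgt_token_set : List String) (lex_cap : Int) (in_effect : Bool) (out : List String) : Prop := out = get_translation_candidates_by_target_alt translation_candidates train_tgt_token_set lex_cap in_effect
instance (translation_candidates : List String) (train_tgt_token_set : List String) (lex_cap : Int) (in_effect : Bool) (out : List String) : Decidable (Spec_get_translation_candidates_by_target translation_candidates train_tgt_token_set lex_cap in_effect out) := by unfold Spec_get_translation_candidates_by_target; infer_instance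

-- ===== CLAIM (what is proved, stated in full; the proofs are below) =====
def Claim_equal_get_translation_candidates_by_target : Prop := ∀ (translation_candidates : List String) (train_tgt_token_set : List String) (lex_cap : Int) (in_effect : Bool), Dom_get_translation_candidates_by_target translation_candidates train_tgt_token_set lex_cap in_effect → Spec_get_translation_candidates_by_target translation_candidates train_tgt_token_set lex_cap in_effect (get_translation_candidates_by_target translation_candidates train_tgt_token_set lex_cap in_effect)

-- ===== LEMMAS AND PROOFS =====
theorem pv_contains_add (x y : String) (s : PySem.Set String) :
    PySem.Set.contains (PySem.Set.add s y) x = (PySem.Set.contains s x || x == y) := by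
  by_cases h : PySem.Set.contains s y = true
  · simp only [PySem.Set.add, h, if_true]
    by_cases hxy : x = y
    · subst hxy
      have : x ∈ s := by simpa using h
      simp [PySem.Set.contains, this]
    · simp [hxy]
  · simp only [PySem.Set.add, h]
    simp only [PySem.Set.contains]
    simp only [if_false, Bool.false_eq_true, List.contains_eq_mem, List.mem_append,
      List.mem_singleton]
    rw [Bool.beq_eq_decide_eq, Bool.decide_or]

theorem pv_contains_empty (x : String) :
    PySem.Set.contains (PySem.Set.empty : PySem.Set String) x = false := rfl

theorem pv_contains_ofList (x : String) (l : List String) :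
    PySem.Set.contains (PySem.Set.ofList l) x = true ↔ x ∈ l := by
  simp [PySem.Set.contains, PySem.Set.mem_ofList]

-- spec-side helper (proofs only): deduplicated non-target elements of cs not already in seen
def pvNT (tgt : List String) : List String → PySem.Set String → List String
  | [], _ => []
  | c :: cs, seen =>
    if tgt.contains c then pvNT tgt cs seen
    else if PySem.Set.contains seen c then pvNT tgt cs seen
    else c :: pvNT tgt cs (PySem.Set.add seen c)

-- deduplicated elements of cs not already in s (no target check: A's second loop)
def pvNT2 : List String → PySem.Set String → List String
  | [], _ => []
  | c :: cs, s =>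
    if PySem.Set.contains s c then pvNT2 cs s
    else c :: pvNT2 cs (PySem.Set.add s c)

theorem pvA_loop2_eq (cs : List String) : ∀ ret s, pvA_loop2 cs ret s = ret ++ pvNT2 cs s := by
  induction cs with
  | nil => intro ret s; simp [pvA_loop2, pvNT2]
  | cons c cs ih =>
    intro ret s
    simp only [pvA_loop2, pvNT2]
    split_ifs with h
    · exact ih ret s
    · rw [ih]
      simp

theorem pvB_loop_eq (tgt : List String) (cap : Int) (cs : List String) :
    ∀ pref rest seen, pvB_loop tgt cap cs pref rest seen =
      match pvA_loop1 tgt cap cs pref with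
      | .inl r => r
      | .inr pf => pf ++ rest ++ pvNT tgt cs seen := by
  induction cs with
  | nil => intro pref rest seen; simp [pvB_loop, pvA_loop1, pvNT]
  | cons c cs ih =>
    intro pref rest seen
    by_cases ht : tgt.contains c = true
    · simp only [pvB_loop, pvA_loop1, pvNT, ht, if_true]
      by_cases hc : ((pref ++ [c]).length : Int) = cap
      · rw [if_pos hc, if_pos hc]
      · rw [if_neg hc, if_neg hc]
        exact ih _ _ _
    · have ht' : tgt.contains c = false := by simpa using ht
      simp only [pvB_loop, pvA_loop1, pvNT, ht', Bool.false_eq_true, if_false]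
      by_cases hs : PySem.Set.contains seen c = true
      · simp only [hs, if_true]
        exact ih _ _ _
      · have hs' : PySem.Set.contains seen c = false := by simpa using hs
        simp only [hs', Bool.false_eq_true, if_false]
        rw [ih]
        cases pvA_loop1 tgt cap cs pref with
        | inl r => rfl
        | inr pf => simp

-- A's loop1 without early return: result elements are old or target members; every target member of cs lands in it
theorem pvA_loop1_inr (tgt : List String) (cap : Int) (cs : List String) :
    ∀ pref pf, pvA_loop1 tgt cap cs pref = .inr pf →
      (∀ x, x ∈ pf → x ∈ pref ∨ tgt.contains x = true) ∧
      (∀ x, x ∈ cs → tgt.contains x = true → x ∈ pf) ∧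
      (∀ x, x ∈ pref → x ∈ pf) := by
  induction cs with
  | nil =>
    intro pref pf h
    simp [pvA_loop1] at h
    subst h
    exact ⟨fun x hx => Or.inl hx, by simp, fun x hx => hx⟩
  | cons c cs ih =>
    intro pref pf h
    by_cases ht : tgt.contains c = true
    · by_cases hc : ((pref ++ [c]).length : Int) = cap
      · simp only [pvA_loop1, ht, if_true] at h
        rw [if_pos hc] at h
        simp at h
      · simp only [pvA_loop1, ht, if_true] at h
        rw [if_neg hc] at h
        obtain ⟨h1, h2, h3⟩ := ih _ _ h
        refine ⟨fun x hx => ?_, fun x hx hxt => ?_, fun x hx => h3 x (by simp [hx])⟩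
        · rcases h1 x hx with h' | h'
          · rcases List.mem_append.1 h' with h'' | h''
            · exact Or.inl h''
            · simp at h''; subst h''; exact Or.inr ht
          · exact Or.inr h'
        · rcases List.mem_cons.1 hx with rfl | hx'
          · exact h3 x (by simp)
          · exact h2 x hx' hxt
    · simp only [pvA_loop1, ht, if_false] at h
      obtain ⟨h1, h2, h3⟩ := ih _ _ h
      refine ⟨h1, fun x hx hxt => ?_, h3⟩
      rcases List.mem_cons.1 hx with rfl | hx'
      · exact absurd hxt ht
      · exact h2 x hx' hxt

-- nt2 with a seed containing all target members of cs equals nt with a seed agreeing on non-targets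
theorem pvNT2_eq_pvNT (tgt : List String) (cs : List String) :
    ∀ (s1 s2 : PySem.Set String),
      (∀ c, tgt.contains c = true → c ∈ cs → PySem.Set.contains s1 c = true) →
      (∀ c, tgt.contains c = false → PySem.Set.contains s1 c = PySem.Set.contains s2 c) →
      pvNT2 cs s1 = pvNT tgt cs s2 := by
  induction cs with
  | nil => intro _ _ _ _; rfl
  | cons c cs ih =>
    intro s1 s2 h1 h2
    by_cases ht : tgt.contains c = true
    · have hc : PySem.Set.contains s1 c = true := h1 c ht (by simp)
      simp only [pvNT2, pvNT, ht, hc, if_true]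
      exact ih s1 s2 (fun d hd hdm => h1 d hd (by simp [hdm])) h2
    · have hn : tgt.contains c = false := by simpa using ht
      have heq : PySem.Set.contains s1 c = PySem.Set.contains s2 c := h2 c hn
      by_cases hc : PySem.Set.contains s1 c = true
      · simp only [pvNT2, pvNT, ht, if_false, hc, heq ▸ hc, if_true]
        exact ih s1 s2 (fun d hd hdm => h1 d hd (by simp [hdm])) h2
      · have hc1 : PySem.Set.contains s1 c = false := by simpa using hc
        have hc2 : PySem.Set.contains s2 c = false := heq ▸ hc1
        simp only [pvNT2, pvNT, ht, hc1, hc2, Bool.false_eq_true, if_false, List.cons.injEq, true_and]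
        refine ih _ _ (fun d hd hdm => ?_) (fun d hd => ?_)
        · have : PySem.Set.contains s1 d = true := h1 d hd (by simp [hdm])
          rw [pv_contains_add]
          simp only [Bool.or_eq_true]
          exact Or.inl this
        · rw [pv_contains_add, pv_contains_add, h2 d hd]


-- ===== VERDICT (by name: the statement is the Claim_ definition above) =====
theorem get_translation_candidates_by_target_spec : Claim_equal_get_translation_candidates_by_target := by
  intro tc tgt cap ie _
  unfold Spec_get_translation_candidates_by_target
  unfold get_translation_candidates_by_target get_translation_candidates_by_target_alt
  by_cases hg : ((tc.length : Int) < cap ∨ ie = false)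
  · simp [hg]
  · simp only [hg, if_false]
    rw [pvB_loop_eq]
    cases h : pvA_loop1 tgt cap tc [] with
    | inl r => rfl
    | inr pf =>
      obtain ⟨h1, h2, _⟩ := pvA_loop1_inr tgt cap tc [] pf h
      dsimp only
      rw [pvA_loop2_eq]
      rw [pvNT2_eq_pvNT tgt tc (PySem.Set.ofList pf) PySem.Set.empty]
      · simp
      · intro c hct hcm
        exact (pv_contains_ofList c pf).2 (h2 c hcm hct)
      · intro c hcf
        rw [pv_contains_empty]
        cases hx : PySem.Set.contains (PySem.Set.ofList pf) c with
        | false => rfl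
        | true =>
          exfalso
          rcases h1 c ((pv_contains_ofList c pf).1 hx) with h' | h'
          · simp at h'
          · rw [hcf] at h'; exact Bool.false_ne_true h'
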